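-- pv_equiv track=rewrite | github.com/take0420/LeetCode-Practice | Arrays_Hashing/maximum_frequency_difference.py | most_frequent_diff
-- ===== SOURCE A (Python) =====
-- from typing import List
-- from collections import defaultdict
--
-- def most_frequent_diff(nums: List[int]) -> int:
--   """
--   与えられた数値配列の隣接する要素間の差の絶対値の中で、
--   最も出現頻度が高いものの出現頻度を計算します。
--
--   Args:
--     nums: 数値のリスト。
--
--   Returns:
--     最も出現頻度が高い差の絶対値の出現頻度。
--     配列長が1以下の場合は0を返します。
--   """
--   # 配列長が1以下の場合、差は計算できないので0を返す
--   if len(nums) < 2: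
--     return 0
--
--   freq_map = defaultdict(int)
--   most_freq_diff_cnt = 0 # 最大頻度を記録
--
--   for i in range(len(nums)-1):
--     # 隣り合う要素の差の絶対値を計算
--     diff = abs(nums[i+1] - nums[i])
--     # 差の出現頻度を更新
--     freq_map[diff] += 1
--     # それまでの最頻値と今の計算で求めた絶対値値を比較し、より大きい方を新たな最頻値とする。
--     most_freq_diff_cnt = max(most_freq_diff_cnt, freq_map[diff])
--
--   return most_freq_diff_cnt
-- ===== SOURCE B (Python) =====
-- from typing import List
--
-- def most_frequent_diff(nums: List[int]) -> int:
--   diffs = sorted(abs(b - a) for a, b in zip(nums, nums[1:]))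
--   best = 0
--   run = 0
--   prev = None
--   for d in diffs:
--     run = run + 1 if d == prev else 1
--     if run > best:
--       best = run
--     prev = d
--   return best
-- ===== Notes on version B (the rewrite author's own statement) =====
-- stated objective: alternative
-- what changed: Replaces A's hash-map counting with a running maximum by sort-then-scan: sort the adjacent absolute differences and return the length of the longest run of equal consecutive values (no frequency map at all).
import Mathlib
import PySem

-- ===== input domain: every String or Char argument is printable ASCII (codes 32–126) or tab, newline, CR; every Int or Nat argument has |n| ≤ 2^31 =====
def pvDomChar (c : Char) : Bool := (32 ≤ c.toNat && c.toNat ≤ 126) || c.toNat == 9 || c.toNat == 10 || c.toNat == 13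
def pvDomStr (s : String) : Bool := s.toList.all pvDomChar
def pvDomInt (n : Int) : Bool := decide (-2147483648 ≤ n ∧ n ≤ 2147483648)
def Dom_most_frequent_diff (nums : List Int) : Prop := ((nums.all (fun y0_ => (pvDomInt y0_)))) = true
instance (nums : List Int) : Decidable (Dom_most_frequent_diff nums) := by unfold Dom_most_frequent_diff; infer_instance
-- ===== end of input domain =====

-- B drops A's frequency map entirely: it sorts the adjacent absolute differences and
-- returns the length of the longest run of equal consecutive values (sort-then-scan).

-- ===== PORT A =====
-- the body of A's for-loop: update the frequency map, then the running maximum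
def aStep (st : PySem.Dict Int Int × Int) (diff : Int) : PySem.Dict Int Int × Int :=
  let fm := st.1.modify diff 0 (· + 1)
  (fm, max st.2 (fm.getD diff 0))

def most_frequent_diff (nums : List Int) : Int :=
  if PySem.List.len nums < 2 then 0
  else
    ((PySem.List.pyRange 0 (PySem.List.len nums - 1) 1).foldl
      (fun st i => aStep st |PySem.List.pyGetD nums (i + 1) 0 - PySem.List.pyGetD nums i 0|)
      (PySem.Dict.empty, 0)).2

-- ===== PORT B =====
-- the body of B's for-loop: state (best, run, prev)
def bStep (st : Int × Int × Option Int) (d : Int) : Int × Int × Option Int :=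
  let run := if st.2.2 = some d then st.2.1 + 1 else 1
  (if run > st.1 then run else st.1, run, some d)

def most_frequent_diff_alt (nums : List Int) : Int :=
  let diffs := PySem.List.sorted ((nums.zip (nums.drop 1)).map (fun p => |p.2 - p.1|)) (fun x => x) false
  (diffs.foldl bStep (0, 0, none)).1

-- ===== PRECONDITION & SPEC =====
def Spec_most_frequent_diff (nums : List Int) (out : Int) : Prop := out = most_frequent_diff_alt nums
instance (nums : List Int) (out : Int) : Decidable (Spec_most_frequent_diff nums out) := by unfold Spec_most_frequent_diff; infer_instance

-- ===== CLAIM =====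
def Claim_equal_most_frequent_diff : Prop := ∀ (nums : List Int), Dom_most_frequent_diff nums → Spec_most_frequent_diff nums (most_frequent_diff nums)

-- ===== LEMMAS AND PROOFS =====

-- A's index loop reads exactly the adjacent absolute differences, in order.
lemma pv_diffs_map (nums : List Int) :
    (PySem.List.pyRange 0 ((nums.length : Int) - 1) 1).map
        (fun i => |PySem.List.pyGetD nums (i + 1) 0 - PySem.List.pyGetD nums i 0|)
      = (nums.zip (nums.drop 1)).map (fun p => |p.2 - p.1|) := by
  apply List.ext_getElem
  · simp [PySem.List.length_pyRange_one]
  · intro k h1 h2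
    have hk : k < nums.length - 1 := by
      simpa [PySem.List.length_pyRange_one] using h1
    simp only [List.getElem_map, PySem.List.getElem_pyRange_one, List.getElem_zip,
      List.getElem_drop]
    rw [show (0 : Int) + (k : Int) = ((k : Nat) : Int) by omega]
    rw [show ((k : Nat) : Int) + 1 = (((k + 1 : Nat)) : Int) by omega]
    rw [PySem.List.pyGetD_natCast, PySem.List.pyGetD_natCast]
    rw [List.getD_eq_getElem _ _ (by omega), List.getD_eq_getElem _ _ (by omega)]
    simp [Nat.add_comm]

-- an upper bound on a running max
lemma pv_foldl_max_le (l : List Int) (f : Int → Int) (m c : Int)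
    (hm : m ≤ c) (h : ∀ x ∈ l, f x ≤ c) :
    l.foldl (fun a x => max a (f x)) m ≤ c := by
  induction l generalizing m with
  | nil => exact hm
  | cons x t ih =>
      exact ih _ (max_le hm (h x (by simp))) (fun y hy => h y (by simp [hy]))

-- a running max over a projection depends only on which elements occur
lemma pv_foldl_max_mem_congr (f : Int → Int) (l1 l2 : List Int) (m : Int)
    (h : ∀ x, x ∈ l1 ↔ x ∈ l2) :
    l1.foldl (fun a x => max a (f x)) m = l2.foldl (fun a x => max a (f x)) m := by
  apply le_antisymm
  · exact pv_foldl_max_le _ _ _ _ (PySem.List.le_foldl_max_int l2 f m).1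
      (fun x hx => (PySem.List.le_foldl_max_int l2 f m).2 x ((h x).mp hx))
  · exact pv_foldl_max_le _ _ _ _ (PySem.List.le_foldl_max_int l1 f m).1
      (fun x hx => (PySem.List.le_foldl_max_int l1 f m).2 x ((h x).mpr hx))

-- A's fused loop: the running maximum it returns is the running max of the FINAL counts
lemma pv_foldA (l : List Int) : ∀ (p : List Int) (m : Int),
    (l.foldl aStep (PySem.Dict.counter p, m)).2
    = l.foldl (fun acc x => max acc (((p ++ l).count x : Int))) m := by
  induction l with
  | nil => intro p m; rfl
  | cons x t ih =>
      intro p m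
      simp only [List.foldl_cons]
      rw [show aStep (PySem.Dict.counter p, m) x
          = (PySem.Dict.counter (p ++ [x]), max m (((p ++ [x]).count x : Nat) : Int)) from by
        simp [aStep, ← PySem.Dict.counter_append_singleton, PySem.Dict.getD_counter]]
      rw [ih (p ++ [x]) (max m ((p ++ [x]).count x : Int))]
      rw [List.append_cons p x t]
      have e1 : ∀ (l' : List Int) (f : Int → Int) (m c : Int),
          l'.foldl (fun a y => max a (f y)) (max m c)
            = max (l'.foldl (fun a y => max a (f y)) m) c := by
        intro l'
        induction l' with
        | nil => intro f m c; rfl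
        | cons y t' ih' =>
            intro f m c
            simp only [List.foldl_cons]
            rw [max_right_comm m c (f y), ih']
      rw [e1, e1]
      by_cases hx : x ∈ t
      · have h2 : (((p ++ [x] ++ t).count x : Nat) : Int)
            ≤ t.foldl (fun a y => max a (((p ++ [x] ++ t).count y : Nat) : Int)) m :=
          (PySem.List.le_foldl_max_int t (fun y => (((p ++ [x] ++ t).count y : Nat) : Int)) m).2 x hx
        have h1 : (((p ++ [x]).count x : Nat) : Int) ≤ (((p ++ [x] ++ t).count x : Nat) : Int) := by
          simp [List.count_append]
        omega
      · have : (p ++ [x] ++ t).count x = (p ++ [x]).count x := by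
          simp [List.count_append, List.count_eq_zero_of_not_mem hx]
        rw [this]

-- B's run scan, mid-run: prev = a has already been seen k times, best ≥ k.
lemma pv_scan_run (t : List Int) : ∀ (a b : Int) (k : Nat),
    t.Pairwise (· ≤ ·) → (∀ x ∈ t, a ≤ x) → 1 ≤ k → (k : Int) ≤ b →
    (t.foldl bStep (b, (k : Int), some a)).1
      = (a :: t).foldl
          (fun acc x => max acc (((List.replicate k a ++ t).count x : Nat) : Int)) b := by
  induction t with
  | nil =>
      intro a b k _ _ hk hkb
      simp only [List.foldl_nil, List.foldl_cons, List.append_nil, List.count_replicate]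
      simp [max_eq_left hkb]
  | cons x t' ih =>
      intro a b k hpw hge hk hkb
      have hax : a ≤ x := hge x (by simp)
      have hpw' : t'.Pairwise (· ≤ ·) := hpw.of_cons
      have hxt' : ∀ y ∈ t', x ≤ y := fun y hy => List.rel_of_pairwise_cons hpw hy
      by_cases hxa : x = a
      · subst hxa
        have hstep : bStep (b, (k : Int), some x) x
            = (max b ((k : Int) + 1), (k : Int) + 1, some x) := by
          simp [bStep, max_def]
          omega
        simp only [List.foldl_cons, hstep]
        rw [show ((k : Int) + 1) = ((k + 1 : Nat) : Int) by push_cast; ring]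
        rw [ih x (max b ((k + 1 : Nat) : Int)) (k + 1) hpw' hxt' (by omega) (le_max_right _ _)]
        -- counts in replicate (k+1) x ++ t' = counts in replicate k x ++ x :: t'
        have hcnt : ∀ y, (List.replicate (k + 1) x ++ t').count y
            = (List.replicate k x ++ x :: t').count y := by
          intro y
          simp only [List.count_append, List.count_replicate, List.count_cons]
          by_cases hyx : x = y <;> simp [hyx] <;> omega
        simp only [List.foldl_cons]
        have hfun : (fun (acc : Int) (y : Int) =>
              max acc (((List.replicate (k + 1) x ++ t').count y : Nat) : Int))
            = (fun (acc : Int) (y : Int) =>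
              max acc (((List.replicate k x ++ x :: t').count y : Nat) : Int)) := by
          funext acc y; rw [hcnt]
        rw [hfun]
        congr 1
        have hge2 : ((k + 1 : Nat) : Int)
            ≤ (((List.replicate k x ++ x :: t').count x : Nat) : Int) := by
          have h : (List.replicate k x ++ x :: t').count x = k + (t'.count x + 1) := by
            simp [List.count_append]
          have h2 : k + 1 ≤ (List.replicate k x ++ x :: t').count x := by omega
          exact_mod_cast h2
        rw [hcnt x, max_assoc, max_assoc, max_eq_right hge2, max_self]
      · have hlt : a < x := lt_of_le_of_ne hax (fun h => hxa h.symm)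
        have hstep : bStep (b, (k : Int), some a) x = (b, 1, some x) := by
          simp [bStep]
          omega
        simp only [List.foldl_cons, hstep]
        rw [show (1 : Int) = ((1 : Nat) : Int) from rfl]
        rw [ih x b 1 hpw' hxt' le_rfl (by exact_mod_cast le_trans (by exact_mod_cast hk) hkb)]
        -- a occurs nowhere in x :: t'
        have hna : a ∉ x :: t' := by
          intro h
          rcases List.mem_cons.mp h with h | h
          · exact absurd h.symm hxa
          · exact absurd rfl (ne_of_lt (lt_of_lt_of_le hlt (hxt' a h))).symm
        have hcnt : ∀ y ∈ x :: t', (List.replicate 1 x ++ t').count y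
            = (List.replicate k a ++ x :: t').count y := by
          intro y hy
          have hya : y ≠ a := fun h => hna (h ▸ hy)
          simp [List.count_append, List.count_replicate, List.count_cons, Ne.symm hya]
        have hcab : max b (((List.replicate k a ++ x :: t').count a : Nat) : Int) = b := by
          have : (List.replicate k a ++ x :: t').count a = k := by
            simp [List.count_append, List.count_eq_zero_of_not_mem hna]
          rw [this]; exact max_eq_left hkb
        simp only [List.foldl_cons, hcab]
        have := PySem.List.foldl_congr_mem' (x :: t')
          (fun (acc : Int) y => max acc (((List.replicate 1 x ++ t').count y : Nat) : Int))
          (fun (acc : Int) y => max acc (((List.replicate k a ++ x :: t').count y : Nat) : Int))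
          b (fun y hy acc => by dsimp only; rw [hcnt y hy])
        simp only [List.foldl_cons] at this
        exact this

-- B's scan over a sorted list computes the running max of the final counts
lemma pv_scan (s : List Int) (hpw : s.Pairwise (· ≤ ·)) :
    (s.foldl bStep (0, 0, none)).1
      = s.foldl (fun acc x => max acc ((s.count x : Nat) : Int)) 0 := by
  cases s with
  | nil => rfl
  | cons a t =>
      have hstep : bStep (0, 0, none) a = (((1:Nat):Int), ((1:Nat):Int), some a) := by simp [bStep]
      simp only [List.foldl_cons, hstep]
      rw [pv_scan_run t a ((1:Nat):Int) 1 hpw.of_cons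
            (fun y hy => List.rel_of_pairwise_cons hpw hy) le_rfl le_rfl]
      simp only [List.replicate_one, List.singleton_append, List.foldl_cons, Nat.cast_one]
      have hca : (1 : Nat) ≤ (a :: t).count a := by simp [List.count_cons_self]
      congr 1
      have h0 : max (0 : Int) (((a :: t).count a : Nat) : Int) = ((a :: t).count a : Nat) :=
        max_eq_right (Int.natCast_nonneg _)
      have h1 : max (1 : Int) (((a :: t).count a : Nat) : Int) = ((a :: t).count a : Nat) :=
        max_eq_right (by exact_mod_cast hca)
      rw [h0, h1]

theorem pv_eq (nums : List Int) : most_frequent_diff nums = most_frequent_diff_alt nums := by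
  unfold most_frequent_diff most_frequent_diff_alt
  simp only [PySem.List.len_eq]
  set diffs := (nums.zip (nums.drop 1)).map (fun p => |p.2 - p.1|) with hdiffs
  set s := PySem.List.sorted diffs (fun x => x) false with hs
  have hperm : s.Perm diffs := PySem.List.sorted_perm diffs (fun x => x) false
  have hB : (s.foldl bStep (0, 0, none)).1
      = diffs.foldl (fun acc x => max acc ((diffs.count x : Nat) : Int)) 0 := by
    rw [pv_scan s (by simpa using PySem.List.sorted_pairwise diffs (fun x => x))]
    have hfun : (fun (acc : Int) (x : Int) => max acc ((s.count x : Nat) : Int))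
        = (fun (acc : Int) (x : Int) => max acc ((diffs.count x : Nat) : Int)) := by
      funext acc x; rw [hperm.count_eq]
    rw [hfun]
    exact pv_foldl_max_mem_congr _ _ _ _ (fun x => hperm.mem_iff)
  split_ifs with hlen
  · -- len < 2: diffs is empty, B scans the empty list and returns 0
    have hd : diffs = [] := by
      rw [hdiffs]
      cases nums with
      | nil => rfl
      | cons a t =>
          have h0 : ((t.length + 1 : Nat) : Int) < 2 := by simpa using hlen
          have : t.length = 0 := by omega
          rw [List.eq_nil_of_length_eq_zero this]
          rfl
    have hsn : s = [] := by rw [hs, hd]; rfl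
    rw [hsn]
    rfl
  · have hfold : (PySem.List.pyRange 0 ((nums.length : Int) - 1) 1).foldl
        (fun st i => aStep st |PySem.List.pyGetD nums (i + 1) 0 - PySem.List.pyGetD nums i 0|)
        (PySem.Dict.empty, 0)
        = diffs.foldl aStep (PySem.Dict.empty, 0) := by
      rw [hdiffs, ← pv_diffs_map nums, List.foldl_map]
    rw [hfold]
    have := pv_foldA diffs [] 0
    simp only [List.nil_append] at this
    rw [show PySem.Dict.counter ([] : List Int) = PySem.Dict.empty from rfl] at this
    rw [this, ← hB]

-- ===== VERDICT =====
theorem most_frequent_diff_spec : Claim_equal_most_frequent_diff := by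
  intro nums _
  exact pv_eq nums
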